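-- pv_equiv track=rewrite | github.com/Syed-Hamza10/strivers_dsa | Leetcode - Easy/max_product.py | foo
-- ===== SOURCE A (Python) =====
-- def foo(nums):
--
--     first_max = nums[0]
--     sec_max = -1
--     n = len(nums)
--
--     for i in range(1, n):
--         if nums[i] > first_max:
--             sec_max = first_max
--             first_max = nums[i]
--         if nums[i] < first_max and nums[i] > sec_max:
--             sec_max = nums[i]
--     return (first_max - 1) * (sec_max - 1)
-- ===== SOURCE B (Python) =====
-- def foo(nums):
--     m = max(nums)
--     sec = max((x for x in nums if x < m), default=-1)
--     return (m - 1) * (sec - 1)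
-- ===== Notes on version B (the rewrite author's own statement) =====
-- stated objective: simpler
-- what changed: Replaces the single-pass two-variable branching state machine by two declarative passes: m = max(nums) and sec = max of the elements strictly below m with default -1.
-- intended difference: On nonempty lists whose first element is the maximum (with max != 1) and whose elements strictly below the maximum are all < -1, A returns (max-1)*(-2) because its sec_max keeps the leftover initialiser -1, while B returns (max-1)*(sec-1) with sec the actual largest element below the maximum, which is the intended second maximum. — e.g. on foo([-5, -6]): A returns 12, B returns 42
import Mathlib
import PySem

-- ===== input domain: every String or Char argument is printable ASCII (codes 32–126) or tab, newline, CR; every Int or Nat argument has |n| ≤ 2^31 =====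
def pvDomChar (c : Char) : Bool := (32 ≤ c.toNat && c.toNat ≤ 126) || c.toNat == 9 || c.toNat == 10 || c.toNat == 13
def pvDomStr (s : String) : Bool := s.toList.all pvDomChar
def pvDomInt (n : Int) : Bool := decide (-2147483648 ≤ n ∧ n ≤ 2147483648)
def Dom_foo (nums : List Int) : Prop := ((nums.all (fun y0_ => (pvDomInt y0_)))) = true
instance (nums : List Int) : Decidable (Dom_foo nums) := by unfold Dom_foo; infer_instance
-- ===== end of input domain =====

-- B replaces A's single-pass two-variable branching state machine by two declarative
-- passes (max of the list, then max of the elements strictly below it, default -1);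
-- objective: simpler. On the D_foo corner below the two differ (A keeps leftover -1 state).

-- ===== PORT A =====
-- A's loop body: the two sequential `if`s updating (first_max, sec_max)
def fooStep (s : Int × Int) (v : Int) : Int × Int :=
  let s1 := if v > s.1 then (v, s.1) else s
  if v < s1.1 ∧ v > s1.2 then (s1.1, v) else s1

def foo (nums : List Int) : Int :=
  match PySem.List.pyGet? nums 0 with
  | none => 0  -- nums[0] raises IndexError on []: excluded by Pre_foo
  | some fm0 =>
    let n : Int := PySem.List.len nums
    let st := (PySem.List.pyRange 1 n).foldl
      (fun s i => fooStep s (PySem.List.pyGetD nums i 0)) (fm0, -1)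
    (st.1 - 1) * (st.2 - 1)

-- ===== PORT B =====
def foo_alt (nums : List Int) : Int :=
  match PySem.List.max? nums (fun x => x) with
  | none => 0  -- max(()) raises ValueError on []: excluded by Pre_foo
  | some m =>
    let sec := PySem.List.maxD (nums.filter (fun x => decide (x < m))) (fun x => x) (-1)
    (m - 1) * (sec - 1)

-- ===== PRECONDITION & SPEC =====
-- A raises IndexError (and B ValueError) on the empty list: excluded.
def Pre_foo (nums : List Int) : Prop := nums ≠ []
instance (nums : List Int) : Decidable (Pre_foo nums) := by unfold Pre_foo; infer_instance
def pvWitness_foo : List Int := [3, 5, 3]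

-- On nonempty lists whose first element is the maximum (with max ≠ 1) and whose elements
-- strictly below the maximum are all < -1, A returns (max-1)*(-2) because its sec_max keeps
-- the leftover initialiser -1, while B returns (max-1)*(sec-1) with sec the actual largest
-- element below the maximum, which is the intended second maximum.
def D_foo (nums : List Int) : Prop :=
  nums ≠ [] ∧ (∀ x ∈ nums, x ≤ nums.headI) ∧ (∃ x ∈ nums, x < nums.headI) ∧
    (∀ x ∈ nums, x < nums.headI → x < -1) ∧ nums.headI ≠ 1
instance (nums : List Int) : Decidable (D_foo nums) := by unfold D_foo; infer_instance

def Spec_foo (nums : List Int) (out : Int) : Prop := ¬ D_foo nums → out = foo_alt nums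
instance (nums : List Int) (out : Int) : Decidable (Spec_foo nums out) := by
  unfold Spec_foo; infer_instance

def pvDiffWitness_foo : List Int := [-5, -6]
def pvDiffWitnessOut_foo : Int × Int := (12, 42)

-- ===== CLAIM (what is proved, stated in full; the proofs are below) =====
def Claim_unchanged_foo : Prop :=
  ∀ (nums : List Int), Dom_foo nums → Pre_foo nums → Spec_foo nums (foo nums)
def Claim_changed_foo : Prop :=
  Dom_foo (pvDiffWitness_foo) ∧ Pre_foo (pvDiffWitness_foo) ∧ D_foo (pvDiffWitness_foo) ∧
    foo (pvDiffWitness_foo) = pvDiffWitnessOut_foo.1 ∧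
    foo_alt (pvDiffWitness_foo) = pvDiffWitnessOut_foo.2 ∧
    pvDiffWitnessOut_foo.1 ≠ pvDiffWitnessOut_foo.2
def Claim_exact_foo : Prop :=
  ∀ (nums : List Int), Dom_foo nums → Pre_foo nums → D_foo nums → foo nums ≠ foo_alt nums

-- ===== LEMMAS AND PROOFS =====

lemma foldl_max_comm (t : List Int) (a b : Int) :
    t.foldl max (max a b) = max a (t.foldl max b) := by
  induction t generalizing b with
  | nil => simp
  | cons v t ih =>
    simp only [List.foldl_cons, max_assoc]
    exact ih (max b v)

lemma foldl_max_of_le (t : List Int) (a : Int) (h : ∀ x ∈ t, x ≤ a) :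
    t.foldl max a = a := by
  induction t with
  | nil => rfl
  | cons v t ih =>
    have hv : v ≤ a := h v (by simp)
    have : max a v = a := by omega
    simp only [List.foldl_cons, this]
    exact ih (fun x hx => h x (by simp [hx]))

-- A's loop, characterised: first component is the running max, second is
-- the largest strictly-below-max element seen (or the pre-bump state with s).
lemma fold_step_eq (t : List Int) (f s : Int) :
    t.foldl fooStep (f, s) =
      (t.foldl max f,
        if f < t.foldl max f then
          ((f :: t).filter (fun x => decide (x < t.foldl max f))).foldl max f
        else (t.filter (fun x => decide (x < f))).foldl max s) := by
  induction t generalizing f s with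
  | nil => simp
  | cons v t ih =>
    by_cases hv : f < v
    · have hstep : fooStep (f, s) v = (v, f) := by
        simp [fooStep, hv]
      have hF : max f v = v := by omega
      have hvF : v ≤ t.foldl max v := (PySem.List.le_foldl_max t v).1
      have hfF : f < t.foldl max v := lt_of_lt_of_le hv hvF
      simp only [List.foldl_cons, hstep, hF, ih, if_pos hfF]
      apply congrArg
      by_cases hv2 : v < t.foldl max v
      · rw [if_pos hv2]
        have hfil : (f :: v :: t).filter (fun x => decide (x < t.foldl max v)) =
            f :: v :: t.filter (fun x => decide (x < t.foldl max v)) := by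
          simp [hfF, hv2]
        have hfil2 : (v :: t).filter (fun x => decide (x < t.foldl max v)) =
            v :: t.filter (fun x => decide (x < t.foldl max v)) := by
          simp [hv2]
        rw [hfil, hfil2]
        simp only [List.foldl_cons]
        have h1 : max (max f f) v = v := by omega
        have h2 : max v v = v := by omega
        rw [h1, h2]
      · have hFv : t.foldl max v = v := le_antisymm (by omega) hvF
        rw [if_neg hv2]
        have hfil : (f :: v :: t).filter (fun x => decide (x < t.foldl max v)) =
            f :: t.filter (fun x => decide (x < t.foldl max v)) := by
          simp [hfF, hv2]
        rw [hfil]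
        simp only [List.foldl_cons]
        have h1 : max f f = f := by omega
        rw [h1, hFv]
    · have hstep : fooStep (f, s) v = (f, if v < f ∧ s < v then v else s) := by
        simp only [fooStep]
        rw [if_neg (by omega : ¬ v > (f, s).1)]
        by_cases hc : v < f ∧ s < v
        · rw [if_pos hc, if_pos hc]
        · rw [if_neg hc, if_neg hc]
      have hF : max f v = f := by omega
      simp only [List.foldl_cons, hstep, hF, ih]
      apply congrArg
      by_cases hfF : f < t.foldl max f
      · rw [if_pos hfF, if_pos hfF]
        have hfil : (f :: v :: t).filter (fun x => decide (x < t.foldl max f)) =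
            f :: v :: t.filter (fun x => decide (x < t.foldl max f)) := by
          simp only [List.filter_cons]
          rw [if_pos (by simpa using hfF), if_pos (by simp only [decide_eq_true_eq]; omega)]
        have hfil2 : (f :: t).filter (fun x => decide (x < t.foldl max f)) =
            f :: t.filter (fun x => decide (x < t.foldl max f)) := by
          simp [hfF]
        rw [hfil, hfil2]
        simp only [List.foldl_cons]
        have h1 : max (max f f) v = f := by omega
        have h2 : max f f = f := by omega
        rw [h1, h2]
      · rw [if_neg hfF, if_neg hfF]
        by_cases hvf : v < f
        · have hfil : (v :: t).filter (fun x => decide (x < f)) =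
              v :: t.filter (fun x => decide (x < f)) := by
            simp [hvf]
          have hs' : (if v < f ∧ s < v then v else s) = max s v := by
            by_cases hsv : s < v
            · rw [if_pos ⟨hvf, hsv⟩]; omega
            · rw [if_neg (by tauto)]; omega
          rw [hfil, hs']
          simp only [List.foldl_cons]
        · have hfil : (v :: t).filter (fun x => decide (x < f)) =
              t.filter (fun x => decide (x < f)) := by
            simp [hvf]
          have hs' : (if v < f ∧ s < v then v else s) = s := by
            rw [if_neg (by tauto)]
          rw [hfil, hs']

lemma foo_cons (h : Int) (t : List Int) :
    foo (h :: t) =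
      (t.foldl max h - 1) *
        ((if h < t.foldl max h then
            ((h :: t).filter (fun x => decide (x < t.foldl max h))).foldl max h
          else (t.filter (fun x => decide (x < h))).foldl max (-1)) - 1) := by
  show (match PySem.List.pyGet? (h :: t) 0 with
    | none => 0
    | some fm0 =>
      let n : Int := PySem.List.len (h :: t)
      let st := (PySem.List.pyRange 1 n).foldl
        (fun s i => fooStep s (PySem.List.pyGetD (h :: t) i 0)) (fm0, -1)
      (st.1 - 1) * (st.2 - 1)) = _
  have hget : PySem.List.pyGet? (h :: t) 0 = some h := by
    simp [pysem]
  rw [hget]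
  simp only
  rw [PySem.List.foldl_pyRange_pyGetD (h :: t) 0 fooStep ((h : Int), (-1 : Int))
        (by norm_num : (0:Int) ≤ 1)]
  simp only [Int.toNat_one, List.drop_one, List.tail_cons]
  rw [fold_step_eq]

lemma foo_alt_cons (h : Int) (t : List Int) :
    foo_alt (h :: t) =
      (t.foldl max h - 1) *
        (PySem.List.maxD ((h :: t).filter (fun x => decide (x < t.foldl max h)))
            (fun x => x) (-1) - 1) := by
  show (match PySem.List.max? (h :: t) (fun x => x) with
    | none => 0
    | some m =>
      let sec := PySem.List.maxD ((h :: t).filter (fun x => decide (x < m))) (fun x => x) (-1)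
      (m - 1) * (sec - 1)) = _
  rw [PySem.List.max?_id_cons]

-- ===== VERDICT (by name: the statement is the Claim_ definition above) =====
theorem foo_spec : Claim_unchanged_foo := by
  intro nums _ hpre hnd
  match nums with
  | [] => exact absurd rfl hpre
  | h :: t =>
    rw [foo_cons, foo_alt_cons]
    have hhF : h ≤ t.foldl max h := (PySem.List.le_foldl_max t h).1
    by_cases hbump : h < t.foldl max h
    · -- A and B agree unconditionally when the max is beaten after index 0
      rw [if_pos hbump]
      have hd : decide (h < t.foldl max h) = true := by simpa using hbump
      simp only [List.filter_cons, hd, if_pos, PySem.List.maxD,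
        PySem.List.max?_id_cons, Option.getD_some, List.foldl_cons, max_self]
    · have hFh : t.foldl max h = h := le_antisymm (by omega) hhF
      rw [if_neg hbump]
      have hfil : (h :: t).filter (fun x => decide (x < h)) =
          t.filter (fun x => decide (x < h)) := by simp
      simp only [hFh, hfil]
      rcases hbl : t.filter (fun x => decide (x < h)) with _ | ⟨b, bs⟩
      · simp [PySem.List.maxD, PySem.List.max?]
      · have hsec : PySem.List.maxD (b :: bs) (fun x => x) (-1) = bs.foldl max b := by
          simp [PySem.List.maxD, PySem.List.max?_id_cons]
        rw [hsec]
        have hS : (b :: bs).foldl max (-1) = max (-1) (bs.foldl max b) := by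
          simp only [List.foldl_cons]
          exact foldl_max_comm bs (-1) b
        rw [hS]
        -- ¬ D_foo: either h = 1 or some strictly-below element is ≥ -1
        have hall : ∀ x ∈ h :: t, x ≤ (h :: t).headI := by
          intro x hx
          rcases List.mem_cons.mp hx with rfl | hx
          · simp
          · simpa using le_trans ((PySem.List.le_foldl_max t h).2 x hx) (le_of_eq hFh)
        have hbmem : b ∈ t.filter (fun x => decide (x < h)) := by
          rw [hbl]; exact List.mem_cons_self
        have hex : ∃ x ∈ h :: t, x < (h :: t).headI := by
          refine ⟨b, List.mem_cons_of_mem h (List.mem_of_mem_filter hbmem), ?_⟩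
          simpa using (List.mem_filter.mp hbmem).2
        by_cases hone : h = 1
        · subst hone; ring
        · have : ¬ (∀ x ∈ h :: t, x < (h :: t).headI → x < -1) := by
            intro hc
            exact hnd ⟨by simp, hall, hex, hc, by simpa using hone⟩
          push Not at this
          obtain ⟨x, hxmem, hxlt, hxge⟩ := this
          simp only [List.headI_cons] at hxlt
          have hxt : x ∈ t := by
            rcases List.mem_cons.mp hxmem with rfl | hx
            · omega
            · exact hx
          have hxbl : x ∈ b :: bs := by
            rw [← hbl]; exact List.mem_filter_of_mem hxt (by simpa using hxlt)
          have hxle : x ≤ bs.foldl max b := by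
            rcases List.mem_cons.mp hxbl with rfl | hx
            · exact (PySem.List.le_foldl_max bs x).1
            · exact (PySem.List.le_foldl_max bs b).2 x hx
          have : max (-1) (bs.foldl max b) = bs.foldl max b := by omega
          rw [this]

theorem foo_changed : Claim_changed_foo := by unfold Claim_changed_foo; decide

theorem foo_tight : Claim_exact_foo := by
  intro nums _ hpre hd
  match nums with
  | [] => exact absurd rfl hpre
  | h :: t =>
    obtain ⟨-, hall, hex, hbelow, hone⟩ := hd
    simp only [List.headI_cons] at hall hex hbelow hone
    have hFh : t.foldl max h = h :=
      foldl_max_of_le t h (fun x hx => hall x (List.mem_cons_of_mem h hx))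
    rw [foo_cons, foo_alt_cons, hFh, if_neg (lt_irrefl h)]
    have hd0 : decide (h < h) = false := by simp
    simp only [List.filter_cons, hd0, Bool.false_eq_true, if_false]
    obtain ⟨x, hxmem, hxlt⟩ := hex
    have hxt : x ∈ t := by
      rcases List.mem_cons.mp hxmem with rfl | hx
      · omega
      · exact hx
    rcases hbl : t.filter (fun x => decide (x < h)) with _ | ⟨b, bs⟩
    · exact absurd (hbl ▸ List.mem_filter_of_mem hxt (by simpa using hxlt)) (by simp)
    · have hsec : PySem.List.maxD (b :: bs) (fun x => x) (-1) = bs.foldl max b := by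
        simp [PySem.List.maxD, PySem.List.max?_id_cons]
      rw [hsec]
      have hS : (b :: bs).foldl max (-1) = max (-1) (bs.foldl max b) := by
        simp only [List.foldl_cons]
        exact foldl_max_comm bs (-1) b
      rw [hS]
      -- every strictly-below element is < -1, so A's sec is -1 while B's is ≤ -2
      have hmem : bs.foldl max b ∈ b :: bs := by
        rcases PySem.List.foldl_max_mem bs b with hb | hb
        · simp [hb]
        · exact List.mem_cons_of_mem b hb
      have hmem' : bs.foldl max b ∈ t.filter (fun x => decide (x < h)) := by
        rw [hbl]; exact hmem
      have hmt : bs.foldl max b ∈ t := List.mem_of_mem_filter hmem'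
      have hmlt : bs.foldl max b < h := by
        simpa using (List.mem_filter.mp hmem').2
      have hneg : bs.foldl max b < -1 :=
        hbelow _ (List.mem_cons_of_mem h hmt) hmlt
      have hmax : max (-1) (bs.foldl max b) = -1 := by omega
      rw [hmax]
      intro hcontra
      rcases mul_eq_mul_left_iff.mp hcontra with h1 | h1 <;> omega
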